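-- pv_equiv track=rewrite | github.com/trevorWieland/rentl | packages/rentl-schemas/src/rentl_schemas/progress.py | _select_percent_mode
-- ===== SOURCE A (Python) =====
-- from enum import StrEnum
--
-- class ProgressPercentMode(StrEnum):
--     """Mode describing how a percent value should be interpreted."""
--
--     UNAVAILABLE = "unavailable"
--     LOWER_BOUND = "lower_bound"
--     ESTIMATED = "estimated"
--     FINAL = "final"
--
-- def _select_percent_mode(
--     modes: list[ProgressPercentMode | str],
-- ) -> ProgressPercentMode:
--     """Select the least confident percent mode from a list.
--
--     Returns:
--         ProgressPercentMode: Least confident percent mode.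
--     """
--     if not modes:
--         return ProgressPercentMode.UNAVAILABLE
--     normalized = [
--         mode if isinstance(mode, ProgressPercentMode) else ProgressPercentMode(mode)
--         for mode in modes
--     ]
--     order = {
--         ProgressPercentMode.UNAVAILABLE: 0,
--         ProgressPercentMode.LOWER_BOUND: 1,
--         ProgressPercentMode.ESTIMATED: 2,
--         ProgressPercentMode.FINAL: 3,
--     }
--     return min(normalized, key=lambda mode: order[mode])
-- ===== SOURCE B (Python) =====
-- from enum import StrEnum
--
-- class ProgressPercentMode(StrEnum):
--     """Mode describing how a percent value should be interpreted."""
--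
--     UNAVAILABLE = "unavailable"
--     LOWER_BOUND = "lower_bound"
--     ESTIMATED = "estimated"
--     FINAL = "final"
--
-- def _select_percent_mode(
--     modes: list[ProgressPercentMode | str],
-- ) -> ProgressPercentMode:
--     """Select the least confident percent mode from a list.
--
--     Returns:
--         ProgressPercentMode: Least confident percent mode.
--     """
--     present = {
--         mode if isinstance(mode, ProgressPercentMode) else ProgressPercentMode(mode)
--         for mode in modes
--     }
--     for candidate in (
--         ProgressPercentMode.UNAVAILABLE,
--         ProgressPercentMode.LOWER_BOUND,
--         ProgressPercentMode.ESTIMATED,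
--         ProgressPercentMode.FINAL,
--     ):
--         if candidate in present:
--             return candidate
--     return ProgressPercentMode.UNAVAILABLE
-- ===== Notes on version B (the rewrite author's own statement) =====
-- stated objective: idiomatic
-- what changed: Replaces the keyed min over the normalized input list with a set of present modes and a first-match scan over the fixed confidence ranking, so the ranking is traversed instead of the input.
import Mathlib
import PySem

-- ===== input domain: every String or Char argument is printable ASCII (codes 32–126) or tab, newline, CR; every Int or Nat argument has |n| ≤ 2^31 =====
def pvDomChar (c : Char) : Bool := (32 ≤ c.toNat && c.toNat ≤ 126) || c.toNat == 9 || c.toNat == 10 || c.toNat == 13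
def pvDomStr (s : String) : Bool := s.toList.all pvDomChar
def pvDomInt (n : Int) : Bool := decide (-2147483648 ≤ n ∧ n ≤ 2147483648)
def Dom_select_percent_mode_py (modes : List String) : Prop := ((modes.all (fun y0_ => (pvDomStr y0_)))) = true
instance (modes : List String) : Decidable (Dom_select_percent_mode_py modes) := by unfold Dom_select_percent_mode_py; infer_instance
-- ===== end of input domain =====

-- B replaces A's keyed min over the input with a set of present modes scanned against
-- the fixed confidence ranking (idiomatic, same cost); return value only, no mutation.

-- ===== PORT A =====
-- order dict of A: mode -> confidence rank (lookup is total on the four valid modes,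
-- Pre_ restricts inputs to those; the final else is never reached under Pre_)
def pvOrder (m : String) : Int :=
  if m = "unavailable" then 0
  else if m = "lower_bound" then 1
  else if m = "estimated" then 2
  else 3

-- min(normalized, key=...) = first element with strictly minimal key (Python min rule);
-- normalization maps each valid string to itself (StrEnum), invalid ones raise (outside Pre_).
def select_percent_mode_py (modes : List String) : String :=
  match modes with
  | [] => "unavailable"
  | m :: rest => rest.foldl (fun best x => if pvOrder x < pvOrder best then x else best) m

-- ===== PORT B =====
def select_percent_mode_py_alt (modes : List String) : String :=
  let present : PySem.Set String := PySem.Set.ofList modes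
  match (["unavailable", "lower_bound", "estimated", "final"].find?
          (fun c => PySem.Set.contains present c)) with
  | some c => c
  | none => "unavailable"

-- ===== PRECONDITION & SPEC =====
-- Pre_ excludes inputs containing a string that is not a valid ProgressPercentMode value:
-- there the Python A raises ValueError in the normalization step.
def Pre_select_percent_mode_py (modes : List String) : Prop :=
  (modes.all (fun m =>
    m == "unavailable" || m == "lower_bound" || m == "estimated" || m == "final")) = true
instance (modes : List String) : Decidable (Pre_select_percent_mode_py modes) := by
  unfold Pre_select_percent_mode_py; infer_instance

def pvWitness_select_percent_mode_py : List String := ["estimated", "unavailable", "final"]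

def Spec_select_percent_mode_py (modes : List String) (out : String) : Prop := out = select_percent_mode_py_alt modes
instance (modes : List String) (out : String) : Decidable (Spec_select_percent_mode_py modes out) := by unfold Spec_select_percent_mode_py; infer_instance

-- ===== CLAIM (what is proved, stated in full; the proofs are below) =====
def Claim_equal_select_percent_mode_py : Prop := ∀ (modes : List String), Dom_select_percent_mode_py modes → Pre_select_percent_mode_py modes → Spec_select_percent_mode_py modes (select_percent_mode_py modes)

-- ===== LEMMAS AND PROOFS =====

-- canonical description of the answer: the least-confident valid mode present
def pvCanon (xs : List String) : String :=
  if xs.contains "unavailable" then "unavailable"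
  else if xs.contains "lower_bound" then "lower_bound"
  else if xs.contains "estimated" then "estimated"
  else if xs.contains "final" then "final"
  else "unavailable"

def pvValid (m : String) : Prop :=
  m = "unavailable" ∨ m = "lower_bound" ∨ m = "estimated" ∨ m = "final"

lemma pvCanon_cons_cons (b x : String) (l : List String)
    (hb : pvValid b) (hx : pvValid x) :
    pvCanon ((if pvOrder x < pvOrder b then x else b) :: l) = pvCanon (b :: x :: l) := by
  rcases hb with hb | hb | hb | hb <;> rcases hx with hx | hx | hx | hx <;> subst hb hx <;>
    simp [pvCanon, pvOrder]

lemma pvFoldl_eq_canon (l : List String) (b : String)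
    (hb : pvValid b) (hl : ∀ m ∈ l, pvValid m) :
    l.foldl (fun best x => if pvOrder x < pvOrder best then x else best) b = pvCanon (b :: l) := by
  induction l generalizing b with
  | nil =>
    rcases hb with hb | hb | hb | hb <;> subst hb <;> simp [pvCanon]
  | cons x l ih =>
    have hx : pvValid x := hl x (by simp)
    have hstep : pvValid (if pvOrder x < pvOrder b then x else b) := by
      split <;> [exact hx; exact hb]
    rw [List.foldl_cons, ih _ hstep (fun m hm => hl m (by simp [hm])),
      pvCanon_cons_cons b x l hb hx]

lemma pvAlt_eq_canon (xs : List String) : select_percent_mode_py_alt xs = pvCanon xs := by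
  simp only [select_percent_mode_py_alt, List.find?, pvCanon]
  by_cases h1 : ("unavailable" : String) ∈ xs <;> by_cases h2 : ("lower_bound" : String) ∈ xs <;>
    by_cases h3 : ("estimated" : String) ∈ xs <;> by_cases h4 : ("final" : String) ∈ xs <;>
    simp [h1, h2, h3, h4]

-- ===== VERDICT (by name: the statement is the Claim_ definition above) =====
theorem select_percent_mode_py_spec : Claim_equal_select_percent_mode_py := by
  intro modes _ hpre
  unfold Spec_select_percent_mode_py
  rw [pvAlt_eq_canon]
  have hv : ∀ m ∈ modes, pvValid m := by
    intro m hm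
    have := List.all_eq_true.mp hpre m hm
    simp only [Bool.or_eq_true, beq_iff_eq] at this
    unfold pvValid; tauto
  cases modes with
  | nil => simp [select_percent_mode_py, pvCanon]
  | cons m rest =>
    simpa [select_percent_mode_py] using
      pvFoldl_eq_canon rest m (hv m (by simp)) (fun x hx => hv x (by simp [hx]))
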